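-- pv_equiv track=rewrite | github.com/kzyma/blocksWorld_AgentJ | AStarHeuristics.py | numOfZeroMoves
-- ===== SOURCE A (Python) =====
-- def numOfZeroMoves(cfg,goal):
--         numOfZeroMoves = 0;
--         cfgSubSet=buildSubset(cfg)
--         goalSubSet=buildSubset(goal)
--         #check for zero-moves
--         for x in cfgSubSet:
--                 if x in goalSubSet:
--                         numOfZeroMoves += 1
--         return numOfZeroMoves
--
-- def buildSubset(cfg):
--         cfgSubSet=[]
--         for i in range(len(cfg)):
--                 for j in range(len(cfg[i])):
--                         cfgSubSet.append(cfg[i][:j+1])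
--         return cfgSubSet
-- ===== SOURCE B (Python) =====
-- def numOfZeroMoves(cfg, goal):
--     # For each cfg row count its longest prefix that is also a prefix of some
--     # goal row (goal prefixes are prefix-closed, so that length IS the number
--     # of matching prefixes); sum over rows.  No prefix lists are materialised.
--     total = 0
--     for r in cfg:
--         best = 0
--         for g in goal:
--             k = 0
--             for x, y in zip(r, g):
--                 if x != y:
--                     break
--                 k += 1
--             if k > best:
--                 best = k
--         total += best
--     return total
-- ===== Notes on version B (the rewrite author's own statement) =====
-- stated objective: faster
-- what changed: Instead of materialising every prefix of every row and scanning the whole goal-prefix list for each cfg prefix, B computes for each cfg row the maximum common-prefix length with any goal row (goal prefixes are prefix-closed, so that length equals the number of matching prefixes) and sums these.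
import Mathlib
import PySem

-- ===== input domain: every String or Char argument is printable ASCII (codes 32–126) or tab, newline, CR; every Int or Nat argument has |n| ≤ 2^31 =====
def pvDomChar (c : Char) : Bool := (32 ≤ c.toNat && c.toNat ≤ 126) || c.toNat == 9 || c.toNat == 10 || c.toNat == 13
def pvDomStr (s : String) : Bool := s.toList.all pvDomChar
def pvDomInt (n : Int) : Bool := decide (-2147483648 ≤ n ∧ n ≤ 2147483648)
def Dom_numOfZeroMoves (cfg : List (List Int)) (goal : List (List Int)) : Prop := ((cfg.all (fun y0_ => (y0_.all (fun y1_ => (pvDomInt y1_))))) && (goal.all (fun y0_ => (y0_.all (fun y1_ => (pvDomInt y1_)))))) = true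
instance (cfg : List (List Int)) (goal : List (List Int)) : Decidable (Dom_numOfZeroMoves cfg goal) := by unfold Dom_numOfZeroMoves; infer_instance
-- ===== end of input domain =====

-- B rewrites A: instead of building both prefix lists and scanning one for each element of the
-- other, B sums per cfg row the maximal common-prefix length with any goal row (measured faster: no prefix lists, no quadratic membership scans).


-- ===== PORT A =====
-- buildSubset: for i in range(len(cfg)): for j in range(len(cfg[i])): append cfg[i][:j+1]
def buildSubset (cfg : List (List Int)) : List (List Int) :=
  (PySem.List.pyRange 0 (cfg.length : Int) 1).foldl (fun acc i =>
    (PySem.List.pyRange 0 ((PySem.List.pyGetD cfg i []).length : Int) 1).foldl (fun acc2 j =>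
      acc2 ++ [PySem.List.slice (PySem.List.pyGetD cfg i []) none (some (j + 1))]) acc) []

def numOfZeroMoves (cfg : List (List Int)) (goal : List (List Int)) : Int :=
  let cfgSubSet := buildSubset cfg
  let goalSubSet := buildSubset goal
  cfgSubSet.foldl (fun n x => if x ∈ goalSubSet then n + 1 else n) 0

-- ===== PORT B =====
-- the zip loop with break: k counts equal leading pairs
def lcpB : List Int → List Int → Int
  | x :: r, y :: g => if x ≠ y then 0 else lcpB r g + 1
  | _, _ => 0

def numOfZeroMoves_alt (cfg : List (List Int)) (goal : List (List Int)) : Int :=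
  cfg.foldl (fun total r =>
    total + goal.foldl (fun best g =>
      let k := lcpB r g
      if k > best then k else best) 0) 0

-- ===== PRECONDITION & SPEC =====
def Spec_numOfZeroMoves (cfg : List (List Int)) (goal : List (List Int)) (out : Int) : Prop := out = numOfZeroMoves_alt cfg goal
instance (cfg : List (List Int)) (goal : List (List Int)) (out : Int) : Decidable (Spec_numOfZeroMoves cfg goal out) := by unfold Spec_numOfZeroMoves; infer_instance

-- ===== CLAIM (what is proved, stated in full; the proofs are below) =====
def Claim_equal_numOfZeroMoves : Prop := ∀ (cfg : List (List Int)) (goal : List (List Int)), Dom_numOfZeroMoves cfg goal → Spec_numOfZeroMoves cfg goal (numOfZeroMoves cfg goal)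

-- ===== LEMMAS AND PROOFS =====

-- Nat-valued common-prefix length (proof-side mirror of lcpB)
def lcpN : List Int → List Int → Nat
  | x :: r, y :: g => if x ≠ y then 0 else lcpN r g + 1
  | _, _ => 0

-- the prefixes of one row, shortest first
def prefixes (row : List Int) : List (List Int) :=
  (List.range row.length).map (fun j => row.take (j + 1))

lemma lcpB_eq (r g : List Int) : lcpB r g = (lcpN r g : Int) := by
  induction r generalizing g with
  | nil => cases g <;> simp [lcpB, lcpN]
  | cons x r ih =>
    cases g with
    | nil => simp [lcpB, lcpN]
    | cons y g => by_cases h : x = y <;> simp [lcpB, lcpN, h, ih]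

lemma lcpN_le_left (r g : List Int) : lcpN r g ≤ r.length := by
  induction r generalizing g with
  | nil => cases g <;> simp [lcpN]
  | cons x r ih =>
    cases g with
    | nil => simp [lcpN]
    | cons y g =>
      by_cases h : x = y <;> simp [lcpN, h]
      exact ih g

lemma lcpN_le_right (r g : List Int) : lcpN r g ≤ g.length := by
  induction r generalizing g with
  | nil => cases g <;> simp [lcpN]
  | cons x r ih =>
    cases g with
    | nil => simp [lcpN]
    | cons y g =>
      by_cases h : x = y <;> simp [lcpN, h]
      exact ih g

lemma take_eq_of_le_lcp (r g : List Int) (n : Nat) (h : n ≤ lcpN r g) :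
    r.take n = g.take n := by
  induction r generalizing g n with
  | nil =>
    cases g <;> simp [lcpN] at h <;> simp [h]
  | cons x r ih =>
    cases g with
    | nil => simp [lcpN] at h; simp [h]
    | cons y g =>
      by_cases hxy : x = y
      · cases n with
        | zero => simp
        | succ n =>
          simp [lcpN, hxy] at h
          simp [hxy, ih g n h]
      · simp [lcpN, hxy] at h; simp [h]

lemma le_lcp_of_take_eq (r g : List Int) (n : Nat) (hr : n ≤ r.length)
    (hg : n ≤ g.length) (h : r.take n = g.take n) : n ≤ lcpN r g := by
  induction r generalizing g n with
  | nil => simp at hr; omega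
  | cons x r ih =>
    cases n with
    | zero => omega
    | succ n =>
      cases g with
      | nil => simp at hg
      | cons y g =>
        simp at h hr hg
        obtain ⟨hxy, ht⟩ := h
        simp [lcpN, hxy]
        exact ih g n hr hg ht

-- membership of a full-length prefix of r among the prefixes of g
lemma take_mem_prefixes_iff (r g : List Int) (j : Nat) (hj : j < r.length) :
    r.take (j + 1) ∈ prefixes g ↔ j + 1 ≤ lcpN r g := by
  constructor
  · rintro hm
    simp only [prefixes, List.mem_map, List.mem_range] at hm
    obtain ⟨k, hk, he⟩ := hm
    have hlr : (r.take (j + 1)).length = j + 1 := by simp; omega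
    have hlg : (g.take (k + 1)).length = k + 1 := by simp; omega
    have hjk : j = k := by rw [he] at hlg; omega
    subst hjk
    exact le_lcp_of_take_eq r g (j + 1) (by omega) (by omega) (by rw [he])
  · intro h
    have hg : j < g.length := lt_of_lt_of_le h (lcpN_le_right r g)
    simp only [prefixes, List.mem_map, List.mem_range]
    exact ⟨j, hg, (take_eq_of_le_lcp r g (j + 1) h).symm⟩

-- n ≤ running max of a projection
lemma le_foldl_maxproj_iff (f : List Int → Nat) (l : List (List Int)) (a n : Nat) :
    n ≤ l.foldl (fun b g => max b (f g)) a ↔ n ≤ a ∨ ∃ g ∈ l, n ≤ f g := by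
  induction l generalizing a with
  | nil => simp
  | cons g l ih =>
    simp only [List.foldl_cons, ih, List.mem_cons]
    constructor
    · rintro (h | h)
      · rcases le_max_iff.mp h with h | h
        · exact Or.inl h
        · exact Or.inr ⟨g, Or.inl rfl, h⟩
      · obtain ⟨g', hg', hn⟩ := h
        exact Or.inr ⟨g', Or.inr hg', hn⟩
    · rintro (h | ⟨g', (rfl | hg'), hn⟩)
      · exact Or.inl (le_max_iff.mpr (Or.inl h))
      · exact Or.inl (le_max_iff.mpr (Or.inr hn))
      · exact Or.inr ⟨g', hg', hn⟩

lemma foldl_maxproj_le (f : List Int → Nat) (l : List (List Int)) (a c : Nat)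
    (ha : a ≤ c) (hf : ∀ g ∈ l, f g ≤ c) :
    l.foldl (fun b g => max b (f g)) a ≤ c := by
  induction l generalizing a with
  | nil => simpa
  | cons g l ih =>
    simp only [List.foldl_cons]
    exact ih _ (max_le ha (hf g (by simp))) (fun g' hg' => hf g' (by simp [hg']))

-- per cfg row: its best common-prefix length with the goal rows
def rowMax (goal : List (List Int)) (r : List Int) : Nat :=
  goal.foldl (fun b g => max b (lcpN r g)) 0

-- how many j < n satisfy j < m (m ≤ n)
lemma countP_range_lt (m n : Nat) (h : m ≤ n) :
    (List.range n).countP (fun j => decide (j < m)) = m := by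
  induction n with
  | zero => simp; omega
  | succ n ih =>
    rw [List.range_succ, List.countP_append]
    by_cases hm : m ≤ n
    · simp [ih hm, List.countP_singleton]; omega
    · have hmn : m = n + 1 := by omega
      subst hmn
      have h2 : (List.range n).countP (fun j => decide (j < n + 1))
          = (List.range n).countP (fun _ => true) := by
        apply List.countP_congr
        intro j hj
        have := List.mem_range.mp hj
        simp
        omega
      rw [h2]
      simp

-- characterisation of A's buildSubset
lemma buildSubset_eq (cfg : List (List Int)) :
    buildSubset cfg = cfg.flatMap prefixes := by
  unfold buildSubset
  rw [PySem.List.foldl_pyRange_zero_pyGetD' cfg ([] : List Int)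
      (fun acc row => (PySem.List.pyRange 0 (row.length : Int) 1).foldl
        (fun acc2 j => acc2 ++ [PySem.List.slice row none (some (j + 1))]) acc) []]
  have hrow : ∀ (row : List Int) (acc : List (List Int)),
      (PySem.List.pyRange 0 (row.length : Int) 1).foldl
        (fun acc2 j => acc2 ++ [PySem.List.slice row none (some (j + 1))]) acc
      = acc ++ prefixes row := by
    intro row acc
    rw [PySem.List.foldl_append_singleton_eq_map, PySem.List.pyRange_zero_nat, List.map_map]
    show acc ++ _ = acc ++ prefixes row
    congr 1
    apply List.map_congr_left
    intro j _
    show PySem.List.slice row none (some ((j : Int) + 1)) = row.take (j + 1)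
    have hc : ((j : Int) + 1) = ((j + 1 : Nat) : Int) := by push_cast; ring
    rw [hc, PySem.List.slice_to_natCast]
  suffices h : ∀ (l : List (List Int)) (acc : List (List Int)),
      l.foldl (fun acc row => (PySem.List.pyRange 0 (row.length : Int) 1).foldl
        (fun acc2 j => acc2 ++ [PySem.List.slice row none (some (j + 1))]) acc) acc
      = acc ++ l.flatMap prefixes by
    simpa using h cfg []
  intro l
  induction l with
  | nil => simp
  | cons r t ih =>
    intro acc
    simp only [List.foldl_cons, List.flatMap_cons]
    rw [hrow r acc, ih]
    simp

-- the count of matching prefixes of one row is exactly rowMax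
lemma countP_prefixes (goal : List (List Int)) (r : List Int) :
    (prefixes r).countP (fun l => decide (l ∈ goal.flatMap prefixes)) = rowMax goal r := by
  have hM : rowMax goal r ≤ r.length :=
    foldl_maxproj_le _ _ _ _ (Nat.zero_le _) (fun g _ => lcpN_le_left r g)
  rw [show prefixes r = (List.range r.length).map (fun j => r.take (j + 1)) from rfl,
      List.countP_map]
  have hcong : (List.range r.length).countP
        ((fun l => decide (l ∈ goal.flatMap prefixes)) ∘ (fun j => r.take (j + 1)))
      = (List.range r.length).countP (fun j => decide (j + 1 ≤ rowMax goal r)) := by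
    apply List.countP_congr
    intro j hj
    have hjlt := List.mem_range.mp hj
    simp only [Function.comp_apply, decide_eq_true_eq, List.mem_flatMap]
    rw [rowMax, le_foldl_maxproj_iff]
    constructor
    · rintro ⟨g, hg, hm⟩
      exact Or.inr ⟨g, hg, (take_mem_prefixes_iff r g j hjlt).mp hm⟩
    · rintro (h | ⟨g, hg, hn⟩)
      · omega
      · exact ⟨g, hg, (take_mem_prefixes_iff r g j hjlt).mpr hn⟩
  rw [hcong,
      show (fun j => decide (j + 1 ≤ rowMax goal r)) = (fun j => decide (j < rowMax goal r))
        from funext (fun j => by rw [decide_eq_decide]; omega),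
      countP_range_lt _ _ hM]

-- B's inner fold computes rowMax (as an Int)
lemma inner_eq_rowMax (goal : List (List Int)) (r : List Int) :
    goal.foldl (fun best g => let k := lcpB r g; if k > best then k else best) 0
      = (rowMax goal r : Int) := by
  have key : ∀ (l : List (List Int)) (a : Nat),
      l.foldl (fun best g => let k := lcpB r g; if k > best then k else best) (a : Int)
        = (((l.foldl (fun b g => max b (lcpN r g)) a : Nat)) : Int) := by
    intro l
    induction l with
    | nil => intro a; rfl
    | cons g t ih =>
      intro a
      show t.foldl _ (if lcpB r g > (a : Int) then lcpB r g else (a : Int))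
        = ((t.foldl (fun b g => max b (lcpN r g)) (max a (lcpN r g)) : Nat) : Int)
      rw [show (if lcpB r g > (a : Int) then lcpB r g else (a : Int))
          = ((max a (lcpN r g) : Nat) : Int) from by
        rw [lcpB_eq]; split_ifs with h <;> omega]
      exact ih (max a (lcpN r g))
  rw [rowMax]
  simpa using key goal 0

-- ===== VERDICT (by name: the statement is the Claim_ definition above) =====
theorem numOfZeroMoves_spec : Claim_equal_numOfZeroMoves := by
  intro cfg goal hD
  clear hD
  show numOfZeroMoves cfg goal = numOfZeroMoves_alt cfg goal
  unfold numOfZeroMoves numOfZeroMoves_alt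
  simp only [buildSubset_eq, inner_eq_rowMax]
  rw [PySem.List.foldl_ite_add_one (fun x => x ∈ goal.flatMap prefixes)]
  rw [PySem.List.foldl_add cfg (fun r => ((rowMax goal r : Nat) : Int)) 0]
  simp only [zero_add]
  induction cfg with
  | nil => simp
  | cons r t ih =>
    simp only [List.flatMap_cons, List.countP_append, List.map_cons, List.sum_cons]
    push_cast
    rw [countP_prefixes]
    push_cast at ih
    omega
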